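-- pv_equiv track=rewrite | github.com/python-in-my-pants/new_finance | Crypto/CoinbaseArbitrageMain.py | get_adj_pairs
-- ===== SOURCE A (Python) =====
-- def get_adj_pairs(_list):
--     ret = []
--
--     for i in range(1, len(_list)):
--         base_currency = _list[i - 1]
--         quote_currency = _list[i]
--
--         ret.append((base_currency, quote_currency))
--
--     ret.append((_list[-1], _list[0]))
--
--     return ret
-- ===== SOURCE B (Python) =====
-- def get_adj_pairs(_list):
--     # Divide and conquer: pair up adjacent elements within each half,
--     # join the halves with their boundary pair, then close the cycle.
--     def adj(seg):
--         if len(seg) < 2: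
--             return []
--         mid = len(seg) // 2
--         left = seg[:mid]
--         right = seg[mid:]
--         return adj(left) + [(left[-1], right[0])] + adj(right)
--
--     return adj(_list) + [(_list[-1], _list[0])]
-- ===== Notes on version B (the rewrite author's own statement) =====
-- stated objective: alternative
-- what changed: Replaces the single index-based loop plus trailing wrap-around append by a divide-and-conquer recursion: split the list in half, pair adjacents within each half recursively, join the halves with their boundary pair, and close the cycle at top level.
-- outside the precondition, e.g. on get_adj_pairs([]): A raises IndexError, B raises IndexError
import Mathlib
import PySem

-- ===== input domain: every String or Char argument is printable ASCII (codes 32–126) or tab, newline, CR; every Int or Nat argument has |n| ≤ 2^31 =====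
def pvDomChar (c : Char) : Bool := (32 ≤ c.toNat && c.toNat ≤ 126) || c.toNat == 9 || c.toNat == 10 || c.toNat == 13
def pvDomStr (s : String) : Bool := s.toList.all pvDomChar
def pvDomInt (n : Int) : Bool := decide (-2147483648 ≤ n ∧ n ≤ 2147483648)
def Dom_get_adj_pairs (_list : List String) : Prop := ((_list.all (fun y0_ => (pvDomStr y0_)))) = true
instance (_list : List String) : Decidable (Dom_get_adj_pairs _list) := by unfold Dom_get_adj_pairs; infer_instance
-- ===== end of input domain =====

-- B replaces the index loop plus trailing wrap-around append by a divide-and-conquer split into halves joined at the boundary (alternative algorithm; return value proved equal).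


-- ===== PORT A =====
def get_adj_pairs (_list : List String) : List (String × String) :=
  let ret : List (String × String) :=
    (PySem.List.pyRange 1 _list.length 1).foldl
      (fun ret i =>
        let base_currency := PySem.List.pyGetD _list (i - 1) ""
        let quote_currency := PySem.List.pyGetD _list i ""
        ret ++ [(base_currency, quote_currency)]) []
  ret ++ [(PySem.List.pyGetD _list (-1) "", PySem.List.pyGetD _list 0 "")]

-- ===== PORT B =====
-- helper 'adj' of Source B; 'len(seg) // 2' on a nonnegative length is exactly Nat division
def pvAdjB (seg : List String) : List (String × String) :=
  if seg.length < 2 then []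
  else
    let mid : Nat := seg.length / 2
    let left := PySem.List.slice seg none (some (mid : Int))
    let right := PySem.List.slice seg (some (mid : Int)) none
    pvAdjB left ++ [(PySem.List.pyGetD left (-1) "", PySem.List.pyGetD right 0 "")] ++ pvAdjB right
termination_by seg.length
decreasing_by
  · rw [PySem.List.slice_to_natCast]; simp only [List.length_take]; omega
  · rw [PySem.List.slice_from_natCast]; simp only [List.length_drop]; omega

def get_adj_pairs_alt (_list : List String) : List (String × String) :=
  pvAdjB _list ++ [(PySem.List.pyGetD _list (-1) "", PySem.List.pyGetD _list 0 "")]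

-- ===== PRECONDITION & SPEC =====
-- Pre_ excludes exactly the empty list, on which both Pythons raise IndexError.
def Pre_get_adj_pairs (_list : List String) : Prop := _list ≠ []
instance (_list : List String) : Decidable (Pre_get_adj_pairs _list) := by unfold Pre_get_adj_pairs; infer_instance
def pvWitness_get_adj_pairs : List String := ["btc", "eth", "usd"]

def Spec_get_adj_pairs (_list : List String) (out : List (String × String)) : Prop := out = get_adj_pairs_alt _list
instance (_list : List String) (out : List (String × String)) : Decidable (Spec_get_adj_pairs _list out) := by unfold Spec_get_adj_pairs; infer_instance

-- ===== CLAIM (what is proved, stated in full; the proofs are below) =====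
def Claim_equal_get_adj_pairs : Prop := ∀ (_list : List String), Dom_get_adj_pairs _list → Pre_get_adj_pairs _list → Spec_get_adj_pairs _list (get_adj_pairs _list)

-- ===== LEMMAS AND PROOFS =====

-- Adjacent pairs of a concatenation split into the two halves plus the boundary pair.
theorem zip_tail_append (l r : List String) (hl : l ≠ []) (hr : r ≠ []) :
    (l ++ r).zip ((l ++ r).tail)
      = l.zip l.tail ++ [(l.getLast hl, r.head hr)] ++ r.zip r.tail := by
  induction l with
  | nil => exact absurd rfl hl
  | cons a l ih =>
    cases l with
    | nil =>
      cases r with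
      | nil => exact absurd rfl hr
      | cons b rr => simp
    | cons c t =>
      have h := ih (by simp)
      simp only [List.cons_append, List.tail_cons, List.zip_cons_cons] at h ⊢
      rw [List.getLast_cons (by simp)]
      simp [h]

-- B's divide-and-conquer computes exactly the adjacent pairs (zip with tail).
theorem pvAdjB_eq_zip_aux (n : Nat) :
    ∀ seg : List String, seg.length ≤ n → pvAdjB seg = seg.zip seg.tail := by
  induction n with
  | zero =>
    intro seg hseg
    have : seg = [] := List.length_eq_zero_iff.mp (by omega)
    subst this
    simp [pvAdjB]
  | succ m ih =>
    intro seg hseg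
    rw [pvAdjB]
    by_cases h2 : seg.length < 2
    · rw [if_pos h2]
      match seg, h2 with
      | [], _ => rfl
      | [x], _ => rfl
    · rw [if_neg h2]
      simp only [PySem.List.slice_to_natCast, PySem.List.slice_from_natCast]
      have hmid1 : 1 ≤ seg.length / 2 := by omega
      have hls : (seg.take (seg.length / 2)).length = seg.length / 2 := by
        simp; omega
      have hl : seg.take (seg.length / 2) ≠ [] := by
        intro hc; rw [hc] at hls; simp at hls; omega
      have hr : seg.drop (seg.length / 2) ≠ [] := by
        intro hc
        have := congrArg List.length hc
        simp at this; omega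
      rw [ih _ (by simp only [List.length_take]; omega),
          ih _ (by simp only [List.length_drop]; omega)]
      rw [PySem.List.pyGetD_neg_one _ "" hl, PySem.List.pyGetD_zero]
      have hhead : (seg.drop (seg.length / 2)).getD 0 ""
          = (seg.drop (seg.length / 2)).head hr := by
        obtain ⟨b, rr, hd⟩ := List.exists_cons_of_ne_nil hr
        simp [hd]
      have key := zip_tail_append _ _ hl hr
      rw [List.take_append_drop] at key
      rw [hhead]
      exact key.symm

theorem pvAdjB_eq_zip (seg : List String) : pvAdjB seg = seg.zip seg.tail :=
  pvAdjB_eq_zip_aux seg.length seg le_rfl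

-- A's index loop computes exactly the adjacent pairs (zip with tail).
theorem loopA_eq_zip (xs : List String) :
    (PySem.List.pyRange 1 xs.length 1).foldl
      (fun ret i => ret ++ [(PySem.List.pyGetD xs (i - 1) "", PySem.List.pyGetD xs i "")])
      ([] : List (String × String))
      = xs.zip xs.tail := by
  simp only [PySem.List.foldl_append_singleton_eq_map, List.nil_append,
    PySem.List.pyRange_one, List.map_map]
  apply List.ext_getElem
  · simp only [List.length_map, List.length_range, List.length_zip, List.length_tail]
    omega
  · intro i h1 h2
    simp only [List.length_map, List.length_range, List.length_zip,
      List.length_tail] at h1 h2 ⊢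
    rw [List.getElem_zip]
    simp only [List.getElem_map, List.getElem_range, Function.comp]
    have e1 : (1 : Int) + (i : Int) - 1 = (i : Int) := by ring
    rw [e1, PySem.List.pyGetD_natCast]
    have e2 : (1 : Int) + (i : Int) = ((i + 1 : Nat) : Int) := by push_cast; ring
    rw [e2, PySem.List.pyGetD_natCast]
    have hi : i < ((xs.length : Int) - 1).toNat := h1
    rw [List.getElem_tail]
    simp [List.getD_eq_getElem?_getD,
      (by omega : i < xs.length), (by omega : i + 1 < xs.length)]

-- ===== VERDICT =====
theorem get_adj_pairs_spec : Claim_equal_get_adj_pairs := by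
  intro _list _hd _hpre
  show get_adj_pairs _list = get_adj_pairs_alt _list
  simp only [get_adj_pairs, get_adj_pairs_alt, loopA_eq_zip, pvAdjB_eq_zip]
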